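-- pv_equiv track=rewrite | github.com/RazorBest/Crypto-Rampage | nsucrypto2023/second_round/problem_02/solve.py | three_gen_5
-- ===== SOURCE A (Python) =====
-- def three_gen_5(limit=20):
--     l = []
--     a = 14
--     b = 5
--     for i in range(limit):
--         l.append(a - b)
--         a *= 14
--         b *= 5
--
--     return l
-- ===== SOURCE B (Python) =====
-- def three_gen_5(limit=20):
--     return [14 ** (i + 1) - 5 ** (i + 1) for i in range(limit)]
-- ===== Notes on version B (the rewrite author's own statement) =====
-- stated objective: simpler
-- what changed: Replaces the loop that maintains two running-product accumulators (a, b) with a stateless one-line comprehension computing each term by direct exponentiation 14**(i+1) - 5**(i+1).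
import Mathlib
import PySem

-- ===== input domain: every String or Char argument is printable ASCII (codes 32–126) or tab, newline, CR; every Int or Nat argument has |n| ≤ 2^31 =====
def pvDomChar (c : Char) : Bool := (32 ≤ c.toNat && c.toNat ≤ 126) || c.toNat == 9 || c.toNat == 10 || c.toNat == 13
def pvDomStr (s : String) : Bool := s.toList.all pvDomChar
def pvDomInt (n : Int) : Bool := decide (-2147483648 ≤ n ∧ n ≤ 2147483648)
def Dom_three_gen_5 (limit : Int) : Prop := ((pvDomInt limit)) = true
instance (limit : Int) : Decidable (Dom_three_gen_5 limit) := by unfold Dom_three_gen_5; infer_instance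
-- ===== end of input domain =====

-- B replaces A's loop with two running-product accumulators by a stateless
-- comprehension computing each term directly as 14^(i+1) - 5^(i+1) (simpler).

-- ===== PORT A =====
-- literal port: for i in range(limit): l.append(a-b); a *= 14; b *= 5
def three_gen_5 (limit : Int) : List Int :=
  ((PySem.List.pyRange 0 limit 1).foldl
    (fun (s : List Int × Int × Int) (_i : Int) =>
      (s.1 ++ [s.2.1 - s.2.2], s.2.1 * 14, s.2.2 * 5))
    ([], 14, 5)).1

-- ===== PORT B =====
def three_gen_5_alt (limit : Int) : List Int :=
  (PySem.List.pyRange 0 limit 1).map (fun i => 14 ^ (i.toNat + 1) - 5 ^ (i.toNat + 1))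

-- ===== PRECONDITION & SPEC =====
def Spec_three_gen_5 (limit : Int) (out : List Int) : Prop := out = three_gen_5_alt limit
instance (limit : Int) (out : List Int) : Decidable (Spec_three_gen_5 limit out) := by unfold Spec_three_gen_5; infer_instance

-- ===== CLAIM (what is proved, stated in full; the proofs are below) =====
def Claim_equal_three_gen_5 : Prop := ∀ (limit : Int), Dom_three_gen_5 limit → Spec_three_gen_5 limit (three_gen_5 limit)

-- ===== LEMMAS AND PROOFS =====

-- loop invariant: the fold appends a * 14^j - b * 5^j for j = 0 .. len-1
theorem three_gen_5_loop (xs : List Int) (acc : List Int) (a b : Int) :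
    ((xs.foldl
      (fun (s : List Int × Int × Int) (_i : Int) =>
        (s.1 ++ [s.2.1 - s.2.2], s.2.1 * 14, s.2.2 * 5))
      (acc, a, b)).1)
    = acc ++ (List.range xs.length).map (fun j => a * 14 ^ j - b * 5 ^ j) := by
  induction xs generalizing acc a b with
  | nil => simp
  | cons x xs ih =>
    simp only [List.foldl_cons, ih, List.length_cons, List.range_succ_eq_map,
      List.map_cons, List.map_map]
    simp [Function.comp, pow_succ]
    exact fun j _ => by ring

theorem three_gen_5_spec : Claim_equal_three_gen_5 := by
  intro limit _
  unfold Spec_three_gen_5 three_gen_5 three_gen_5_alt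
  rw [three_gen_5_loop, PySem.List.pyRange_one]
  simp [List.map_map, Function.comp, pow_succ]
  exact fun j _ => by ring
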